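-- pv_equiv track=rewrite | github.com/rwth-i6/i6_experiments | users/raissi/setups/common/analysis/labels.py | count
-- ===== SOURCE A (Python) =====
-- import itertools
--
-- def count(alignment, silence_symbol, non_speech_symbols):
--     hmm_lengths = list()
--     hmm_unk_lengths = list()
--     hmm_0_lengths = list()
--     hmm_1_lengths = list()
--     hmm_2_lengths = list()
--     hmm_num = 0
--     hmm_unk_num = 0
--     hmm_0_num = 0
--     hmm_1_num = 0
--     hmm_2_num = 0
--     total_frames = list()
--
--     for cur_label, val in itertools.groupby(alignment):
--         v_len = len(list(val))
--         total_frames.append(v_len)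
--
--         if cur_label[0].strip() == silence_symbol:
--             continue
--
--         hmm_unk_lengths.append(v_len)
--         hmm_unk_num += 1
--
--         if cur_label[0].strip() in non_speech_symbols:
--             continue
--
--         hmm_lengths.append(v_len)
--         hmm_num += 1
--
--         if cur_label[1] == 0:
--             hmm_0_lengths.append(v_len)
--             hmm_0_num += 1
--         if cur_label[1] == 1:
--             hmm_1_lengths.append(v_len)
--             hmm_1_num += 1
--         if cur_label[1] == 2:
--             hmm_2_lengths.append(v_len)
--             hmm_2_num += 1
--
--     return (
--         hmm_lengths,
--         hmm_num,
--         hmm_0_lengths,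
--         hmm_0_num,
--         hmm_1_lengths,
--         hmm_1_num,
--         hmm_2_lengths,
--         hmm_2_num,
--         total_frames,
--         hmm_unk_lengths,
--         hmm_unk_num,
--     )
-- ===== SOURCE B (Python) =====
-- from itertools import groupby
--
--
-- def count(alignment, silence_symbol, non_speech_symbols):
--     runs = [(label, sum(1 for _ in grp)) for label, grp in groupby(alignment)]
--     total_frames = [n for _, n in runs]
--     unk_runs = [(lab, n) for lab, n in runs if lab[0].strip() != silence_symbol]
--     hmm_runs = [(lab, n) for lab, n in unk_runs
--                 if lab[0].strip() not in non_speech_symbols]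
--     hmm_unk_lengths = [n for _, n in unk_runs]
--     hmm_lengths = [n for _, n in hmm_runs]
--     hmm_0_lengths = [n for lab, n in hmm_runs if lab[1] == 0]
--     hmm_1_lengths = [n for lab, n in hmm_runs if lab[1] == 1]
--     hmm_2_lengths = [n for lab, n in hmm_runs if lab[1] == 2]
--     return (
--         hmm_lengths,
--         len(hmm_lengths),
--         hmm_0_lengths,
--         len(hmm_0_lengths),
--         hmm_1_lengths,
--         len(hmm_1_lengths),
--         hmm_2_lengths,
--         len(hmm_2_lengths),
--         total_frames,
--         hmm_unk_lengths,
--         len(hmm_unk_lengths),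
--     )
-- ===== Notes on version B (the rewrite author's own statement) =====
-- stated objective: simpler
-- what changed: A's single stateful loop with eleven accumulators and continue-based control flow is replaced by building the run-length list once and deriving each output as its own map/filter over it, with every *_num computed as len() of the corresponding list instead of a separate counter.
import Mathlib
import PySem

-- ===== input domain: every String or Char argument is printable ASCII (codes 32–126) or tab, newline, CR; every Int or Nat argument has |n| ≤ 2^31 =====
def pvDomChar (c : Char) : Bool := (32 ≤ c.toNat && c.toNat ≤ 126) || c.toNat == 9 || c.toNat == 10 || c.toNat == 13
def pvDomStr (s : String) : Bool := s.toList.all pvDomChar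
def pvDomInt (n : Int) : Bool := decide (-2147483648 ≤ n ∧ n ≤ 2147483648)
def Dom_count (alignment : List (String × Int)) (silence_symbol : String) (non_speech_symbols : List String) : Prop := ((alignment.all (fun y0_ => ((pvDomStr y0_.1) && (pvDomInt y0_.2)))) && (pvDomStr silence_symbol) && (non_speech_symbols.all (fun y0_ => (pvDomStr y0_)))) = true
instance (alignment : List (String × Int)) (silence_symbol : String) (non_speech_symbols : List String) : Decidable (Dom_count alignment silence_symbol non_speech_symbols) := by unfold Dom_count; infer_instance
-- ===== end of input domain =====

-- One honest line: B replaces A's single stateful loop (eleven accumulators, continue-based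
-- control flow) by one run-length list and per-output map/filter passes — simpler decomposition.

-- itertools.groupby with the identity key, paired with the length of each group
-- (shared helper: both Pythons call itertools.groupby).
def pyRunsAux {α : Type} [BEq α] (cur : α) (n : Int) : List α → List (α × Int)
  | [] => [(cur, n)]
  | y :: ys => if y == cur then pyRunsAux cur (n + 1) ys else (cur, n) :: pyRunsAux y 1 ys

def pyRuns {α : Type} [BEq α] : List α → List (α × Int)
  | [] => []
  | x :: xs => pyRunsAux x 1 xs

-- ===== PORT A =====
-- A's for-loop over the groups, carrying the eleven loop variables in return-tuple order.
def countLoop (silence_symbol : String) (non_speech_symbols : List String) :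
    List ((String × Int) × Int) →
    (List Int × Int × List Int × Int × List Int × Int × List Int × Int × List Int × List Int × Int) →
    (List Int × Int × List Int × Int × List Int × Int × List Int × Int × List Int × List Int × Int)
  | [], st => st
  | (lab, vLen) :: rest, (hl, hn, l0, n0, l1, n1, l2, n2, tf, ul, un) =>
    let tf := tf ++ [vLen]
    if PySem.Str.strip lab.1 == silence_symbol then
      countLoop silence_symbol non_speech_symbols rest (hl, hn, l0, n0, l1, n1, l2, n2, tf, ul, un)
    else
      let ul := ul ++ [vLen]
      let un := un + 1
      if non_speech_symbols.contains (PySem.Str.strip lab.1) then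
        countLoop silence_symbol non_speech_symbols rest (hl, hn, l0, n0, l1, n1, l2, n2, tf, ul, un)
      else
        let hl := hl ++ [vLen]
        let hn := hn + 1
        let l0 := if lab.2 == 0 then l0 ++ [vLen] else l0
        let n0 := if lab.2 == 0 then n0 + 1 else n0
        let l1 := if lab.2 == 1 then l1 ++ [vLen] else l1
        let n1 := if lab.2 == 1 then n1 + 1 else n1
        let l2 := if lab.2 == 2 then l2 ++ [vLen] else l2
        let n2 := if lab.2 == 2 then n2 + 1 else n2
        countLoop silence_symbol non_speech_symbols rest (hl, hn, l0, n0, l1, n1, l2, n2, tf, ul, un)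

def count (alignment : List (String × Int)) (silence_symbol : String) (non_speech_symbols : List String) : List Int × Int × List Int × Int × List Int × Int × List Int × Int × List Int × List Int × Int :=
  countLoop silence_symbol non_speech_symbols (pyRuns alignment)
    ([], 0, [], 0, [], 0, [], 0, [], [], 0)

-- ===== PORT B =====
def unkRuns (silence_symbol : String) (rs : List ((String × Int) × Int)) : List ((String × Int) × Int) :=
  rs.filter (fun r => !(PySem.Str.strip r.1.1 == silence_symbol))

def hmmRuns (silence_symbol : String) (non_speech_symbols : List String) (rs : List ((String × Int) × Int)) : List ((String × Int) × Int) :=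
  (unkRuns silence_symbol rs).filter (fun r => !(non_speech_symbols.contains (PySem.Str.strip r.1.1)))

def count_alt (alignment : List (String × Int)) (silence_symbol : String) (non_speech_symbols : List String) : List Int × Int × List Int × Int × List Int × Int × List Int × Int × List Int × List Int × Int :=
  let rs := pyRuns alignment
  let totalFrames := rs.map (·.2)
  let unk := unkRuns silence_symbol rs
  let hmm := hmmRuns silence_symbol non_speech_symbols rs
  let hmmUnkLengths := unk.map (·.2)
  let hmmLengths := hmm.map (·.2)
  let hmm0 := (hmm.filter (fun r => r.1.2 == 0)).map (·.2)
  let hmm1 := (hmm.filter (fun r => r.1.2 == 1)).map (·.2)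
  let hmm2 := (hmm.filter (fun r => r.1.2 == 2)).map (·.2)
  (hmmLengths, (hmmLengths.length : Int),
   hmm0, (hmm0.length : Int),
   hmm1, (hmm1.length : Int),
   hmm2, (hmm2.length : Int),
   totalFrames, hmmUnkLengths, (hmmUnkLengths.length : Int))

-- ===== PRECONDITION & SPEC =====
def Spec_count (alignment : List (String × Int)) (silence_symbol : String) (non_speech_symbols : List String) (out : List Int × Int × List Int × Int × List Int × Int × List Int × Int × List Int × List Int × Int) : Prop := out = count_alt alignment silence_symbol non_speech_symbols
instance (alignment : List (String × Int)) (silence_symbol : String) (non_speech_symbols : List String) (out : List Int × Int × List Int × Int × List Int × Int × List Int × Int × List Int × List Int × Int) : Decidable (Spec_count alignment silence_symbol non_speech_symbols out) := by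
  unfold Spec_count
  haveI d1 : DecidableEq (List Int × List Int × Int) := instDecidableEqProd
  haveI d2 : DecidableEq (Int × List Int × List Int × Int) := instDecidableEqProd
  haveI d3 : DecidableEq (List Int × Int × List Int × List Int × Int) := instDecidableEqProd
  haveI d4 : DecidableEq (Int × List Int × Int × List Int × List Int × Int) := instDecidableEqProd
  haveI d5 : DecidableEq (List Int × Int × List Int × Int × List Int × List Int × Int) := instDecidableEqProd
  haveI d6 : DecidableEq (Int × List Int × Int × List Int × Int × List Int × List Int × Int) := instDecidableEqProd
  haveI d7 : DecidableEq (List Int × Int × List Int × Int × List Int × Int × List Int × List Int × Int) := instDecidableEqProd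
  haveI d8 : DecidableEq (Int × List Int × Int × List Int × Int × List Int × Int × List Int × List Int × Int) := instDecidableEqProd
  exact instDecidableEqProd _ _

-- ===== CLAIM (what is proved, stated in full; the proofs are below) =====
def Claim_equal_count : Prop := ∀ (alignment : List (String × Int)) (silence_symbol : String) (non_speech_symbols : List String), Dom_count alignment silence_symbol non_speech_symbols → Spec_count alignment silence_symbol non_speech_symbols (count alignment silence_symbol non_speech_symbols)

-- ===== LEMMAS AND PROOFS =====

theorem countLoop_eq (ss : String) (ns : List String) :
    ∀ (rs : List ((String × Int) × Int)) hl hn l0 n0 l1 n1 l2 n2 tf ul un,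
      countLoop ss ns rs (hl, hn, l0, n0, l1, n1, l2, n2, tf, ul, un) =
      (hl ++ (hmmRuns ss ns rs).map (·.2),
       hn + (((hmmRuns ss ns rs).length : Int)),
       l0 ++ ((hmmRuns ss ns rs).filter (fun r => r.1.2 == 0)).map (·.2),
       n0 + ((((hmmRuns ss ns rs).filter (fun r => r.1.2 == 0)).length : Int)),
       l1 ++ ((hmmRuns ss ns rs).filter (fun r => r.1.2 == 1)).map (·.2),
       n1 + ((((hmmRuns ss ns rs).filter (fun r => r.1.2 == 1)).length : Int)),
       l2 ++ ((hmmRuns ss ns rs).filter (fun r => r.1.2 == 2)).map (·.2),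
       n2 + ((((hmmRuns ss ns rs).filter (fun r => r.1.2 == 2)).length : Int)),
       tf ++ rs.map (·.2),
       ul ++ (unkRuns ss rs).map (·.2),
       un + (((unkRuns ss rs).length : Int))) := by
  intro rs
  induction rs with
  | nil => intro hl hn l0 n0 l1 n1 l2 n2 tf ul un; simp [countLoop, hmmRuns, unkRuns]
  | cons r rest ih =>
    intro hl hn l0 n0 l1 n1 l2 n2 tf ul un
    obtain ⟨lab, vLen⟩ := r
    simp only [countLoop, hmmRuns, unkRuns, List.filter_cons, List.map_cons]
    by_cases h1 : PySem.Str.strip lab.1 == ss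
    · simp only [h1, reduceIte, Bool.not_true, ih]
      simp [hmmRuns, unkRuns]
    · by_cases h2 : ns.contains (PySem.Str.strip lab.1)
      · have h2' : PySem.Str.strip lab.1 ∈ ns := by simpa using h2
        simp only [h1, h2, Bool.not_false, reduceIte, ih]
        simp [hmmRuns, unkRuns, h2', List.append_assoc, Bool.and_comm]
        omega
      · simp only [h1, h2, Bool.not_false, reduceIte, ih]
        by_cases e0 : lab.2 == 0 <;> by_cases e1 : lab.2 == 1 <;> by_cases e2 : lab.2 == 2 <;>
          simp_all [hmmRuns, unkRuns, List.append_assoc, Bool.and_comm] <;> omega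

-- ===== VERDICT (by name: the statement is the Claim_ definition above) =====
theorem count_spec : Claim_equal_count := by
  intro alignment ss ns _
  unfold Spec_count count count_alt
  simp [countLoop_eq]
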